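-- pv_equiv track=rewrite | github.com/ytlzq0228/Quectel_Location_Reporter | oled_display.py | _first_last_diff
-- ===== SOURCE A (Python) =====
-- def _first_last_diff(old_str, new_str):
--     """返回 (first_diff, last_diff) 即首个和最后一个不同字符的下标（含）。"""
--     old = old_str or ""
--     new = new_str or ""
--     first = len(old)
--     for i in range(min(len(old), len(new))):
--         if old[i] != new[i]:
--             first = i
--             break
--     else:
--         first = min(len(old), len(new))
--     last = first - 1
--     for i in range(max(len(old), len(new)) - 1, first - 1, -1):
--         o = old[i] if i < len(old) else ""
--         n = new[i] if i < len(new) else ""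
--         if o != n:
--             last = i
--             break
--     return first, last
-- ===== SOURCE B (Python) =====
-- def _first_last_diff(old_str, new_str):
--     old = old_str or ""
--     new = new_str or ""
--     diffs = [i for i in range(max(len(old), len(new)))
--              if (old[i] if i < len(old) else None) != (new[i] if i < len(new) else None)]
--     if diffs:
--         return diffs[0], diffs[-1]
--     m = min(len(old), len(new))
--     return m, m - 1
-- ===== Notes on version B (the rewrite author's own statement) =====
-- stated objective: simpler
-- what changed: Replaces A's two scans (a prefix-bounded forward scan for the first mismatch plus a backward suffix scan from the top for the last) by a single forward pass that collects every differing index and then takes the endpoints of that list, with the same (min, min-1) default for equal strings.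
import Mathlib
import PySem

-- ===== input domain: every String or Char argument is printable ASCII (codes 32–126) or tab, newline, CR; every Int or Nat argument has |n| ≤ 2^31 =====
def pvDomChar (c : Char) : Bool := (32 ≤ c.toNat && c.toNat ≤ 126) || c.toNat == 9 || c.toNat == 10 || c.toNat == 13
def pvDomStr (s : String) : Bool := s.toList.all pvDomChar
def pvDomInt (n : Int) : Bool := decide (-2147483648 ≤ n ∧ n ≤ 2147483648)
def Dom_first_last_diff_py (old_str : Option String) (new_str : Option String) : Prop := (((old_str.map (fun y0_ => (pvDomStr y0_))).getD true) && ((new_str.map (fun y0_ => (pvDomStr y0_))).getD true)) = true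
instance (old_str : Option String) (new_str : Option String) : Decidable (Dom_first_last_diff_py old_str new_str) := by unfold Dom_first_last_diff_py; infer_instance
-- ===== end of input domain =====

-- B replaces A's two scans (prefix-bounded forward scan, then backward suffix scan)
-- by one forward pass collecting every differing index and taking its endpoints; objective: simpler.

-- ===== PORT A =====
-- forward scan: for i in range(min(len old, len new)): if old[i] != new[i]: first = i; break
-- else: first = min(...).  Indices i are in range for both lists, so comparing
-- old[i]? with new[i]? (both `some _`) is exactly Python's old[i] != new[i].
def pvAFirstLoop (old new : List Char) (i : Nat) : Nat → Nat
  | 0 => min old.length new.length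
  | Nat.succ k => if old[i]? ≠ new[i]? then i else pvAFirstLoop old new (i + 1) k

-- backward scan: for i in range(max-1, first-1, -1); o/n = the char if in range else "".
-- `old[i]?` is `some c` when in range and `none` otherwise, matching Python's
-- sentinel "" (a present char never equals the sentinel).
def pvALastLoop (old new : List Char) (first : Nat) : Nat → Int
  | 0 => (first : Int) - 1
  | Nat.succ k =>
      let i := first + k
      if old[i]? ≠ new[i]? then (i : Int) else pvALastLoop old new first k

def first_last_diff_py (old_str : Option String) (new_str : Option String) : Int × Int :=
  let old := (old_str.getD "").toList
  let new := (new_str.getD "").toList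
  let first := pvAFirstLoop old new 0 (min old.length new.length)
  let last := pvALastLoop old new first (max old.length new.length - first)
  ((first : Int), last)

-- ===== PORT B =====
def first_last_diff_py_alt (old_str : Option String) (new_str : Option String) : Int × Int :=
  let old := (old_str.getD "").toList
  let new := (new_str.getD "").toList
  let diffs := (List.range (max old.length new.length)).filter
    (fun i => decide (old[i]? ≠ new[i]?))
  match diffs with
  | [] => let m := min old.length new.length; ((m : Int), (m : Int) - 1)
  | h :: t => ((h : Int), (((h :: t).getLast (List.cons_ne_nil h t) : Nat) : Int))

-- ===== PRECONDITION & SPEC =====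
def Spec_first_last_diff_py (old_str : Option String) (new_str : Option String) (out : Int × Int) : Prop := out = first_last_diff_py_alt old_str new_str
instance (old_str : Option String) (new_str : Option String) (out : Int × Int) : Decidable (Spec_first_last_diff_py old_str new_str out) := by unfold Spec_first_last_diff_py; infer_instance

-- ===== CLAIM (what is proved, stated in full; the proofs are below) =====
def Claim_equal_first_last_diff_py : Prop := ∀ (old_str : Option String) (new_str : Option String), Dom_first_last_diff_py old_str new_str → Spec_first_last_diff_py old_str new_str (first_last_diff_py old_str new_str)


-- ===== LEMMAS AND PROOFS =====

-- A's forward loop finds the first differing index, with default min-length.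
theorem pvAFirstLoop_eq (old new : List Char) :
    ∀ (fuel i : Nat),
      pvAFirstLoop old new i fuel =
        ((List.range' i fuel).find? (fun j => decide (old[j]? ≠ new[j]?))).getD
          (min old.length new.length)
  | 0, i => by simp [pvAFirstLoop]
  | Nat.succ k, i => by
      rw [pvAFirstLoop, List.range'_succ]
      by_cases h : old[i]? ≠ new[i]? <;>
        simp [h, pvAFirstLoop_eq old new k (i + 1)]

-- A's backward loop returns the last differing index of the range, default first-1.
theorem pvALastLoop_eq (old new : List Char) (first : Nat) :
    ∀ (fuel : Nat),
      pvALastLoop old new first fuel =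
        (match ((List.range' first fuel).filter (fun j => decide (old[j]? ≠ new[j]?))).getLast? with
         | some x => (x : Int)
         | none => (first : Int) - 1)
  | 0 => by simp [pvALastLoop]
  | Nat.succ k => by
      rw [pvALastLoop, List.range'_concat, List.filter_append]
      by_cases h : old[first + k]? ≠ new[first + k]? <;>
        simp [h, pvALastLoop_eq old new first k]

-- nothing strictly below the found index satisfies the predicate
theorem pv_find_below (p : Nat → Bool) :
    ∀ (n i j : Nat), i ≤ j → j < ((List.range' i n).find? p).getD (i + n) → p j = false
  | 0, i, j, hij, hlt => by simp at hlt; omega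
  | Nat.succ k, i, j, hij, hlt => by
      rw [List.range'_succ, List.find?_cons] at hlt
      by_cases h : p i
      · simp [h] at hlt; omega
      · simp [h] at hlt
        rcases Nat.eq_or_lt_of_le hij with rfl | hij'
        · simpa using h
        · exact pv_find_below p k (i + 1) j hij' (by
            have he : i + 1 + k = i + (k + 1) := by omega
            rw [he]; exact hlt)

theorem pv_find_le (p : Nat → Bool) (n i : Nat) :
    ((List.range' i n).find? p).getD (i + n) ≤ i + n := by
  cases hf : (List.range' i n).find? p with
  | none => simp
  | some a =>
      have := List.mem_of_find?_eq_some hf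
      rw [List.mem_range'_1] at this
      simp; omega

-- indices between the two lengths always differ (one side in range, other not)
theorem pv_mid_diff (old new : List Char) (j : Nat)
    (h1 : min old.length new.length ≤ j) (h2 : j < max old.length new.length) :
    old[j]? ≠ new[j]? := by
  rcases Nat.le_total old.length new.length with h | h
  · have ho : old[j]? = none := List.getElem?_eq_none (by omega)
    have hn : new[j]?.isSome := by
      have hj : j < new.length := by omega
      simp [List.getElem?_eq_getElem hj]
    intro he; rw [ho] at he; rw [← he] at hn; simp at hn
  · have hn : new[j]? = none := List.getElem?_eq_none (by omega)
    have ho : old[j]?.isSome := by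
      have hj : j < old.length := by omega
      simp [List.getElem?_eq_getElem hj]
    intro he; rw [hn] at he; rw [he] at ho; simp at ho

-- the two list-level computations agree
theorem pv_core (old new : List Char) :
    (((pvAFirstLoop old new 0 (min old.length new.length) : Nat) : Int),
      pvALastLoop old new (pvAFirstLoop old new 0 (min old.length new.length))
        (max old.length new.length - pvAFirstLoop old new 0 (min old.length new.length)))
    = (match (List.range (max old.length new.length)).filter
          (fun i => decide (old[i]? ≠ new[i]?)) with
       | [] => (((min old.length new.length : Nat) : Int), ((min old.length new.length : Nat) : Int) - 1)
       | h :: t => ((h : Int), (((h :: t).getLast (List.cons_ne_nil h t) : Nat) : Int))) := by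
  set p : Nat → Bool := fun j => decide (old[j]? ≠ new[j]?) with hp
  set m := min old.length new.length with hm
  set L := max old.length new.length with hL
  have hmL : m ≤ L := by omega
  set f := pvAFirstLoop old new 0 m with hf
  have hfeq : f = ((List.range' 0 m).find? p).getD m := by
    rw [hf, pvAFirstLoop_eq]
  have hfm : f ≤ m := by
    rw [hfeq]; have := pv_find_le p m 0; simpa using this
  have hbelow : ∀ j, j < f → p j = false := by
    intro j hj
    refine pv_find_below p m 0 j (Nat.zero_le _) ?_
    simpa [← hfeq] using hj
  have hsplit : List.range' 0 L = List.range' 0 f ++ List.range' f (L - f) := by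
    have h1 := List.range'_append (s := 0) (m := f) (n := L - f) (step := 1)
    simp at h1; rw [h1]; congr 1; omega
  have hfilterlow : (List.range' 0 f).filter p = [] := by
    apply List.filter_eq_nil_iff.mpr
    intro a ha
    rw [List.mem_range'_1] at ha
    simp [hbelow a (by omega)]
  have hdiffs : (List.range L).filter p = (List.range' f (L - f)).filter p := by
    rw [List.range_eq_range', hsplit, List.filter_append, hfilterlow, List.nil_append]
  rw [hdiffs]
  by_cases hcase : f < L
  · have hpf : p f = true := by
      rcases Nat.lt_or_ge f m with hlt | hge
      · cases hff : (List.range' 0 m).find? p with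
        | none => rw [hfeq, hff] at hlt; simp at hlt
        | some a =>
            have hfa : f = a := by rw [hfeq, hff]; rfl
            rw [hfa]; exact List.find?_some hff
      · have hfm' : f = m := by omega
        rw [hp]; simp only [decide_eq_true_eq]
        exact pv_mid_diff old new f (by omega) (by omega)
    have hcons : List.range' f (L - f) = f :: List.range' (f + 1) (L - f - 1) := by
      have h1 : L - f = (L - f - 1) + 1 := by omega
      rw [h1, List.range'_succ]; norm_num
    rw [hcons, List.filter_cons_of_pos hpf]
    rw [pvALastLoop_eq]
    rw [hcons, List.filter_cons_of_pos hpf]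
    rw [List.getLast?_eq_some_getLast (List.cons_ne_nil _ _)]
  · have hfL : f = L := by omega
    have hnil : (List.range' f (L - f)).filter p = [] := by
      rw [hfL]; simp
    rw [hnil, pvALastLoop_eq, hnil]
    simp [hfL]
    omega

-- ===== VERDICT (by name: the statement is the Claim_ definition above) =====
theorem first_last_diff_py_spec : Claim_equal_first_last_diff_py := by
  intro old_str new_str _
  unfold Spec_first_last_diff_py first_last_diff_py first_last_diff_py_alt
  exact pv_core ((old_str.getD "").toList) ((new_str.getD "").toList)
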